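-- pv_equiv track=rewrite | github.com/agernz/DigitalSystems | StateMachineSimplifier/StateSolver.py | sortTerms
-- ===== SOURCE A (Python) =====
-- def sortTerms(arr):
--     numones = 0
--     numsorted = 0
--     sorted_bnums = []
--     while numsorted < len(arr):
--         group = []
--         for term in arr:
--              if term.count("1") == numones:
--                  numsorted += 1
--                  group.append(term)
--         # Add group to list as long as there are terms in the group
--         if len(group) > 0:
--             sorted_bnums.append(group)
--         numones += 1
--
--     return sorted_bnums
-- ===== SOURCE B (Python) =====
-- def sortTerms(arr):
--     buckets = {}
--     for term in arr:
--         buckets.setdefault(term.count("1"), []).append(term)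
--     return [buckets[k] for k in sorted(buckets)]
-- ===== Notes on version B (the rewrite author's own statement) =====
-- stated objective: alternative
-- what changed: A rescans the whole list once per ones-count (0,1,2,...) until all terms are placed; B makes a single bucketing pass into a dict keyed by the ones-count and emits the groups by sorted keys.
import Mathlib
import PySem

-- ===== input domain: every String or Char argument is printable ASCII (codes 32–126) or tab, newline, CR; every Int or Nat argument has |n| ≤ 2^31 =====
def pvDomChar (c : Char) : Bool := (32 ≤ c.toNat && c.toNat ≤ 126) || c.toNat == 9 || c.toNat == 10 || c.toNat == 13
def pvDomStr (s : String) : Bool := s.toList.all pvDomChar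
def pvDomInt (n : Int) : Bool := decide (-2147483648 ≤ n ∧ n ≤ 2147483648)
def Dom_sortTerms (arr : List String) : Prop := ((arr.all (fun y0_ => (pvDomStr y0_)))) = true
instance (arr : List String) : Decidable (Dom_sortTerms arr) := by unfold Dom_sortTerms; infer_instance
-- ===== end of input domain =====

-- B replaces A's repeated whole-list scans (one per ones-count) by a single bucketing pass
-- into a dict keyed by the ones-count, emitting the groups by sorted keys.

-- ===== PORT A =====
-- term.count("1") (used by both programs)
def pvCnt (t : String) : Int := (PySem.Str.count t "1" : Int)

-- fuel for A's while loop: every term has ones-count ≤ the sum of all counts,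
-- so after this many iterations numones exceeds every count and the loop condition is false
def pvFuel (arr : List String) : Nat := (arr.map (fun t => PySem.Str.count t "1")).sum + 1

def sortTermsLoop (arr : List String) (numones numsorted : Int)
    (sorted_bnums : List (List String)) : Nat → List (List String)
  | 0 => sorted_bnums
  | fuel + 1 =>
    if numsorted < (arr.length : Int) then
      let r := arr.foldl
        (fun (p : Int × List String) term =>
          if pvCnt term == numones then (p.1 + 1, p.2 ++ [term]) else p)
        (numsorted, ([] : List String))
      sortTermsLoop arr (numones + 1) r.1
        (if r.2.length > 0 then sorted_bnums ++ [r.2] else sorted_bnums) fuel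
    else sorted_bnums

def sortTerms (arr : List String) : List (List String) :=
  sortTermsLoop arr 0 0 [] (pvFuel arr)

-- ===== PORT B =====
def pvBuckets (arr : List String) : PySem.Dict Int (List String) :=
  arr.foldl (fun d term => d.modify (pvCnt term) [] (fun g => g ++ [term])) PySem.Dict.empty

-- buckets[k] for k taken from sorted(buckets): k is always a present key, so getD is exact
def sortTerms_alt (arr : List String) : List (List String) :=
  (PySem.List.sorted (pvBuckets arr).keys (fun k => k)).map (fun k => (pvBuckets arr).getD k [])

-- ===== PRECONDITION & SPEC =====
def Spec_sortTerms (arr : List String) (out : List (List String)) : Prop := out = sortTerms_alt arr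
instance (arr : List String) (out : List (List String)) : Decidable (Spec_sortTerms arr out) := by unfold Spec_sortTerms; infer_instance

-- ===== CLAIM (what is proved, stated in full; the proofs are below) =====
def Claim_equal_sortTerms : Prop := ∀ (arr : List String), Dom_sortTerms arr → Spec_sortTerms arr (sortTerms arr)

-- ===== LEMMAS AND PROOFS =====

-- the group of terms with exactly i ones, in input order
def pvGrp (arr : List String) (i : Int) : List String := arr.filter (fun t => pvCnt t == i)

-- canonical result: the nonempty groups for i = a, a+1, …, b-1, in that order
def pvCanon (arr : List String) (a b : Int) : List (List String) :=
  (PySem.List.pyRange a b).filterMap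
    (fun i => if (pvGrp arr i).isEmpty then none else some (pvGrp arr i))

lemma pv_fold_step (arr : List String) (numones ns : Int) (g : List String) :
    arr.foldl (fun (p : Int × List String) term =>
        if pvCnt term == numones then (p.1 + 1, p.2 ++ [term]) else p) (ns, g)
      = (ns + ((pvGrp arr numones).length : Int), g ++ pvGrp arr numones) := by
  induction arr generalizing ns g with
  | nil => simp [pvGrp]
  | cons t rest ih =>
    have hg : pvGrp (t :: rest) numones
        = if pvCnt t == numones then t :: pvGrp rest numones else pvGrp rest numones := by
      simp [pvGrp, List.filter_cons]
    by_cases h : (pvCnt t == numones) = true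
    · rw [List.foldl_cons, if_pos h, ih, hg, if_pos h]
      refine Prod.ext ?_ ?_
      · simp only [List.length_cons]; push_cast; ring
      · simp
    · rw [List.foldl_cons, if_neg h, ih, hg, if_neg h]

lemma pv_filter_split (l : List String) (k : Int) :
    (l.filter (fun t => decide (pvCnt t < k + 1))).length
      = (l.filter (fun t => decide (pvCnt t < k))).length
        + (l.filter (fun t => pvCnt t == k)).length := by
  induction l with
  | nil => simp
  | cons t rest ih =>
    simp only [List.filter_cons]
    rcases lt_trichotomy (pvCnt t) k with h | h | h
    · rw [if_pos (decide_eq_true (show pvCnt t < k + 1 by omega)),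
        if_pos (decide_eq_true h),
        if_neg (show ¬ (pvCnt t == k) = true by simp; omega)]
      simp only [List.length_cons]
      omega
    · rw [if_pos (decide_eq_true (show pvCnt t < k + 1 by omega)),
        if_neg (show ¬ (decide (pvCnt t < k)) = true by simp; omega),
        if_pos (show (pvCnt t == k) = true by simp [h])]
      simp only [List.length_cons]
      omega
    · rw [if_neg (show ¬ (decide (pvCnt t < k + 1)) = true by simp; omega),
        if_neg (show ¬ (decide (pvCnt t < k)) = true by simp; omega),
        if_neg (show ¬ (pvCnt t == k) = true by simp; omega)]
      omega

lemma pv_pairwise_pyRange (a b : Int) : (PySem.List.pyRange a b).Pairwise (· < ·) := by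
  generalize hn : (b - a).toNat = n
  induction n generalizing a with
  | zero =>
    have hnil : PySem.List.pyRange a b = [] :=
      List.eq_nil_iff_forall_not_mem.mpr
        (fun x hx => by rw [PySem.List.mem_pyRange_one] at hx; omega)
    rw [hnil]; exact List.Pairwise.nil
  | succ n ih =>
    by_cases h : a < b
    · rw [PySem.List.pyRange_one_cons h]
      refine List.Pairwise.cons ?_ (ih (a + 1) (by omega))
      intro x hx; rw [PySem.List.mem_pyRange_one] at hx; omega
    · have hnil : PySem.List.pyRange a b = [] :=
        List.eq_nil_iff_forall_not_mem.mpr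
          (fun x hx => by rw [PySem.List.mem_pyRange_one] at hx; omega)
      rw [hnil]; exact List.Pairwise.nil

lemma pv_loop (arr : List String) : ∀ (fuel : Nat) (numones : Int) (acc : List (List String)),
    (∀ t ∈ arr, pvCnt t < numones + fuel) →
    sortTermsLoop arr numones ((arr.filter (fun t => decide (pvCnt t < numones))).length : Int)
        acc fuel
      = acc ++ pvCanon arr numones (numones + fuel) := by
  intro fuel
  induction fuel with
  | zero =>
    intro numones acc _
    have hnil : PySem.List.pyRange numones numones = [] :=
      List.eq_nil_iff_forall_not_mem.mpr
        (fun x hx => by rw [PySem.List.mem_pyRange_one] at hx; omega)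
    simp [sortTermsLoop, pvCanon, hnil]
  | succ fuel ih =>
    intro numones acc hf
    have hb : numones + ((fuel + 1 : Nat) : Int) = (numones + 1) + (fuel : Int) := by
      push_cast; ring
    by_cases hc : ((arr.filter (fun t => decide (pvCnt t < numones))).length : Int)
        < (arr.length : Int)
    · have hns : ((arr.filter (fun t => decide (pvCnt t < numones))).length : Int)
          + ((pvGrp arr numones).length : Int)
          = ((arr.filter (fun t => decide (pvCnt t < numones + 1))).length : Int) := by
        have h2 := pv_filter_split arr numones
        unfold pvGrp
        push_cast
        exact_mod_cast h2.symm
      have hrec := fun acc => ih (numones + 1) acc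
        (by intro t ht; have := hf t ht; push_cast at this ⊢; omega)
      by_cases hg : pvGrp arr numones = []
      · simp only [sortTermsLoop, if_pos hc, pv_fold_step, hg, List.nil_append,
          List.length_nil, Int.natCast_zero, add_zero, gt_iff_lt, lt_self_iff_false, if_false]
        have hns0 : ((arr.filter (fun t => decide (pvCnt t < numones))).length : Int)
            = ((arr.filter (fun t => decide (pvCnt t < numones + 1))).length : Int) := by
          rw [← hns, hg]; simp
        rw [hns0, hrec acc]
        have : pvCanon arr numones (numones + ((fuel + 1 : Nat) : Int))
            = pvCanon arr (numones + 1) ((numones + 1) + (fuel : Int)) := by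
          unfold pvCanon
          rw [hb, PySem.List.pyRange_one_cons (by omega), List.filterMap_cons]
          simp [hg]
        rw [this]
      · have hglen : 0 < (pvGrp arr numones).length := List.length_pos_of_ne_nil hg
        simp only [sortTermsLoop, if_pos hc, pv_fold_step, List.nil_append, gt_iff_lt]
        rw [if_pos hglen, hns, hrec (acc ++ [pvGrp arr numones])]
        have : pvCanon arr numones (numones + ((fuel + 1 : Nat) : Int))
            = pvGrp arr numones :: pvCanon arr (numones + 1) ((numones + 1) + (fuel : Int)) := by
          unfold pvCanon
          rw [hb, PySem.List.pyRange_one_cons (by omega), List.filterMap_cons]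
          simp [List.isEmpty_iff, hg]
        rw [this, List.append_assoc]
        rfl
    · simp only [sortTermsLoop, if_neg hc]
      have hle : (arr.filter (fun t => decide (pvCnt t < numones))).length ≤ arr.length :=
        List.length_filter_le _ _
      have hge : arr.length ≤ (arr.filter (fun t => decide (pvCnt t < numones))).length := by
        exact_mod_cast not_lt.mp hc
      have hall : ∀ t ∈ arr, pvCnt t < numones := by
        intro t ht
        have heq : (arr.filter (fun t => decide (pvCnt t < numones))).length = arr.length := by
          omega
        have := (List.length_filter_eq_length_iff.mp heq) t ht
        simpa using this
      have hnilc : pvCanon arr numones (numones + ((fuel + 1 : Nat) : Int)) = [] := by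
        unfold pvCanon
        rw [List.filterMap_eq_nil_iff]
        intro i hi
        rw [PySem.List.mem_pyRange_one] at hi
        have hgi : pvGrp arr i = [] := by
          unfold pvGrp
          rw [List.filter_eq_nil_iff]
          intro t ht
          have := hall t ht
          simp; omega
        simp [hgi]
      rw [hnilc, List.append_nil]

lemma pv_cnt_lt_fuel (arr : List String) (t : String) (ht : t ∈ arr) :
    pvCnt t < (pvFuel arr : Int) := by
  have hmem : PySem.Str.count t "1" ∈ arr.map (fun t => PySem.Str.count t "1") :=
    List.mem_map.mpr ⟨t, ht, rfl⟩
  have hle : PySem.Str.count t "1" ≤ (arr.map (fun t => PySem.Str.count t "1")).sum :=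
    List.single_le_sum (fun x _ => Nat.zero_le x) _ hmem
  unfold pvCnt pvFuel
  omega

lemma pv_A_eq (arr : List String) : sortTerms arr = pvCanon arr 0 (pvFuel arr) := by
  have h0 : ((arr.filter (fun t => decide (pvCnt t < 0))).length : Int) = 0 := by
    have : arr.filter (fun t => decide (pvCnt t < 0)) = [] := by
      rw [List.filter_eq_nil_iff]
      intro t _
      simp [pvCnt]
    simp [this]
  have := pv_loop arr (pvFuel arr) 0 []
    (by intro t ht; have := pv_cnt_lt_fuel arr t ht; omega)
  rw [h0] at this
  unfold sortTerms
  rw [this]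
  simp

lemma pv_getD (arr : List String) (k : Int) : (pvBuckets arr).getD k [] = pvGrp arr k := by
  unfold pvBuckets
  have hmap : arr.foldl (fun d term => d.modify (pvCnt term) [] (fun g => g ++ [term]))
        PySem.Dict.empty
      = (arr.map (fun t => ((pvCnt t, t) : Int × String))).foldl
          (fun d p => d.modify p.1 [] (fun g => g ++ [p.2])) PySem.Dict.empty := by
    rw [List.foldl_map]
  rw [hmap, PySem.Dict.getD_foldl_modify_append]
  simp [PySem.Dict.getD_empty, List.filter_map, pvGrp, Function.comp_def]

lemma pv_keys_mem (arr : List String) (k : Int) :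
    k ∈ (pvBuckets arr).keys ↔ k ∈ arr.map pvCnt := by
  unfold pvBuckets
  rw [PySem.Dict.keys_foldl_modify_key arr pvCnt [] (fun _ term => fun g => g ++ [term])
    PySem.Dict.empty]
  rw [PySem.Dict.keys_empty]
  simp [PySem.Set.mem_update]

lemma pv_keys_nodup (arr : List String) : (pvBuckets arr).keys.Nodup := by
  unfold pvBuckets
  exact PySem.Dict.nodup_keys_foldl_modify_key arr pvCnt [] (fun _ term => fun g => g ++ [term])
    PySem.Dict.empty PySem.Dict.nodup_keys_empty

-- the sorted key list, named: strictly increasing ones-counts that occur in arr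
def pvR (arr : List String) : List Int :=
  (PySem.List.pyRange 0 (pvFuel arr)).filter (fun i => !(pvGrp arr i).isEmpty)

lemma pv_sorted_keys (arr : List String) :
    PySem.List.sorted (pvBuckets arr).keys (fun k => k) = pvR arr := by
  have hRnd : (pvR arr).Nodup := by
    unfold pvR
    exact ((pv_pairwise_pyRange 0 (pvFuel arr)).filter _).imp (fun h => ne_of_lt h)
  apply PySem.List.sorted_eq_of_perm_of_pairwise_lt
  · rw [List.perm_ext_iff_of_nodup hRnd (pv_keys_nodup arr)]
    intro a
    simp only [pvR, List.mem_filter, PySem.List.mem_pyRange_one, pv_keys_mem]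
    constructor
    · rintro ⟨-, hne⟩
      have hne2 : pvGrp arr a ≠ [] := by simpa using hne
      rcases List.exists_mem_of_ne_nil _ hne2 with ⟨t, htg⟩
      have hmf := List.mem_filter.mp (show t ∈ List.filter (fun t => pvCnt t == a) arr from htg)
      exact List.mem_map.mpr ⟨t, hmf.1, by simpa using hmf.2⟩
    · intro hmem
      rcases List.mem_map.mp hmem with ⟨t, ht, rfl⟩
      refine ⟨⟨by simp [pvCnt], pv_cnt_lt_fuel arr t ht⟩, ?_⟩
      have hne2 : pvGrp arr (pvCnt t) ≠ [] := by
        intro hnil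
        have htg : t ∈ pvGrp arr (pvCnt t) := List.mem_filter.mpr ⟨ht, by simp⟩
        rw [hnil] at htg
        exact absurd htg (List.not_mem_nil)
      simpa using hne2
  · unfold pvR
    exact (pv_pairwise_pyRange 0 (pvFuel arr)).filter _

lemma pv_filter_not_map_filterMap {α β : Type} (p : α → Bool) (f : α → β) (l : List α) :
    (l.filter (fun x => !p x)).map f
      = l.filterMap (fun x => if p x then none else some (f x)) := by
  induction l with
  | nil => simp
  | cons a l ih => by_cases h : p a <;> simp [h, ih]

-- ===== VERDICT (by name: the statement is the Claim_ definition above) =====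
theorem sortTerms_spec : Claim_equal_sortTerms := by
  intro arr _
  unfold Spec_sortTerms sortTerms_alt
  rw [pv_A_eq, pv_sorted_keys]
  have : ∀ k, (pvBuckets arr).getD k [] = pvGrp arr k := pv_getD arr
  simp only [this]
  rw [pvR, pv_filter_not_map_filterMap (fun i => (pvGrp arr i).isEmpty) (pvGrp arr)]
  rfl
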